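-- pv_equiv track=rewrite | github.com/kyungmin1212/Algorithm | 프로그래머스/2/258711. 도넛과 막대 그래프/도넛과 막대 그래프.py | solution
-- ===== SOURCE A (Python) =====
-- from collections import defaultdict
--
-- def solution(edges):
--     answer = []
--     # 들어오는 간선이 0 개면 그건 연결노드
--     in_degree = defaultdict(int)
--     graph = defaultdict(list)
--     for a,b in edges:
--         in_degree[b]+=1
--         in_degree[a]+=0
--         graph[a].append(b)
--
--     node = -1
--     for k , v in in_degree.items():
--         if v==0 and len(graph[k])>=2:
--             node = k
--             break
--
--     answer = [node,0,0,0]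
--     for start_node in graph[node]:
--         # 나가는 노드가 2개면 8자
--         # 나가는 노드가 1개면 도넛,막대,8자
--         # 계속순환 해야함. (자기자신으로 돌아올때까지 2개나 0개가 없으면 그건 도넛)
--         # 나가는 노드가 0개면 무조건 막대
--         # start_node에서 dfs로 계속 들어가서 자기 자신으로 돌아오면 도넛
--
--         now_node = start_node
--         while True:
--             if len(graph[now_node])==0:
--                 answer[2]+=1
--                 break
--             if len(graph[now_node])==2:
--                 answer[3]+=1
--                 break
--             now_node =graph[now_node][0]
--             if now_node ==start_node:
--                 answer[1]+=1
--                 break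
--
--     return answer
-- ===== SOURCE B (Python) =====
-- def classify(graph, start, memo):
--     # one shared DP over the first-successor functional graph: walk a path once,
--     # then label every node on it (path compression); a pure cycle labels as donut (1)
--     path, on_path, cur, c = [], set(), start, 1
--     while cur not in memo:
--         if cur in on_path:
--             break  # entered a cycle not through start (A never returns here)
--         outs = graph.get(cur, [])
--         if len(outs) == 0:
--             path.append(cur)
--             c = 2
--             break
--         if len(outs) == 2:
--             path.append(cur)
--             c = 3
--             break
--         path.append(cur)
--         on_path.add(cur)
--         cur = outs[0]
--         if cur == start:
--             break  # c stays 1: the path is a pure cycle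
--     else:
--         c = memo[cur]
--     for x in path:
--         memo[x] = c
--     return c
--
--
-- def solution(edges):
--     graph = {}
--     in_degree = {}
--     for a, b in edges:
--         graph.setdefault(a, []).append(b)
--         in_degree[b] = in_degree.get(b, 0) + 1
--         in_degree.setdefault(a, 0)
--     node = next((k for k, v in in_degree.items() if v == 0 and len(graph.get(k, [])) >= 2), -1)
--     answer = [node, 0, 0, 0]
--     memo = {}
--     for s in graph.get(node, []):
--         answer[classify(graph, s, memo)] += 1
--     return answer
-- ===== Notes on version B (the rewrite author's own statement) =====
-- stated objective: alternative
-- what changed: B replaces A's independent naive per-successor pointer-chasing walks with one shared memoized classification over the first-successor functional graph: each walk records its path once, labels every node on it with the resulting class (path compression), and later successors reuse those labels instead of re-walking; B also detects cycles so it always terminates where A loops forever.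
import Mathlib
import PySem

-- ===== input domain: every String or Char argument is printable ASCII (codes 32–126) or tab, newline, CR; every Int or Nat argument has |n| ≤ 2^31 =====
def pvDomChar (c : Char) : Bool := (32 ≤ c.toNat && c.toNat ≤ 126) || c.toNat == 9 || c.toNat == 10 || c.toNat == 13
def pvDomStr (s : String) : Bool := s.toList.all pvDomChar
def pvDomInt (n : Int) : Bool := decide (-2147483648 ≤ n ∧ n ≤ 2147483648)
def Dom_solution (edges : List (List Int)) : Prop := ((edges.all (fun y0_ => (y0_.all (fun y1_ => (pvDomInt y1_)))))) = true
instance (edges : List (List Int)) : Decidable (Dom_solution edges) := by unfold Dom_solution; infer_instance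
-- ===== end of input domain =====

-- B replaces A's independent naive walk per successor with one shared memoized classification
-- over the first-successor functional graph: each walk labels its whole path at once
-- (path compression) and labels are reused across successors (objective: alternative).

-- ===== PORT A =====
-- the 'for a,b in edges' loop building in_degree and graph; none = Python's ValueError on unpacking
def solBuild : List (List Int) → PySem.Dict Int Int → PySem.Dict Int (List Int) →
    Option (PySem.Dict Int Int × PySem.Dict Int (List Int))
  | [], ind, g => some (ind, g)
  | e :: rest, ind, g =>
    match e with
    | [a, b] => solBuild rest ((ind.modify b 0 (· + 1)).modify a 0 (· + 0)) (g.modify a [] (· ++ [b]))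
    | _ => none

-- one run of A's 'while True' walk, returning the (donut, stick, eight) increment; the fuel
-- (edges.length + 1 at the call site) only totalises the recursion
def solWalk (g : PySem.Dict Int (List Int)) (start : Int) : Int → Nat → Int × Int × Int
  | _, 0 => (0, 0, 0)
  | now, fuel + 1 =>
    if (g.getD now []).length == 0 then (0, 1, 0)
    else if (g.getD now []).length == 2 then (0, 0, 1)
    else
      let nxt := (g.getD now []).headD 0   -- graph[now_node][0]; the list is nonempty here
      if nxt == start then (1, 0, 0) else solWalk g start nxt fuel

def solution (edges : List (List Int)) : List Int :=
  match solBuild edges PySem.Dict.empty PySem.Dict.empty with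
  | none => []   -- Python raises ValueError here; excluded by Pre_solution
  | some (ind, g) =>
    let node := ((ind.items.find? (fun kv =>
        kv.2 == 0 && decide (2 ≤ (g.getD kv.1 []).length))).map (·.1)).getD (-1)
    let res := (g.getD node []).foldl (fun acc st =>
        let d := solWalk g st st (edges.length + 1)
        (acc.1 + d.1, acc.2.1 + d.2.1, acc.2.2 + d.2.2)) (0, 0, 0)
    [node, res.1, res.2.1, res.2.2]

-- ===== PORT B =====
-- the 'for a,b in edges' loop of Source B (setdefault-based); none = ValueError on unpacking
def altBuild : List (List Int) → PySem.Dict Int (List Int) → PySem.Dict Int Int →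
    Option (PySem.Dict Int (List Int) × PySem.Dict Int Int)
  | [], g, ind => some (g, ind)
  | e :: rest, g, ind =>
    match e with
    | [a, b] => altBuild rest (g.modify a [] (· ++ [b]))
        ((ind.insert b (ind.getD b 0 + 1)).setdefault a 0)
    | _ => none

-- Source B's classify loop: walks until a memo hit / revisit / stop node / return to start,
-- returning the class and the accumulated path (labelled afterwards); fuel totalises only
def classifyGo (g : PySem.Dict Int (List Int)) (start : Int) (memo : PySem.Dict Int Int)
    (path : List Int) (onPath : PySem.Set Int) (cur : Int) : Nat → Int × List Int
  | 0 => (1, path)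
  | fuel + 1 =>
    match memo.get? cur with
    | some c => (c, path)
    | none =>
      if onPath.contains cur then (1, path)
      else
        let outs := g.getD cur []
        if outs.length == 0 then (2, path ++ [cur])
        else if outs.length == 2 then (3, path ++ [cur])
        else
          let cur' := outs.headD 0
          if cur' == start then (1, path ++ [cur])
          else classifyGo g start memo (path ++ [cur]) (PySem.Set.add onPath cur) cur' fuel

-- Source B's classify: run the walk, then label every path node with the class (memo[x] = c)
def classifyB (g : PySem.Dict Int (List Int)) (start : Int) (memo : PySem.Dict Int Int)
    (fuel : Nat) : Int × PySem.Dict Int Int :=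
  let r := classifyGo g start memo [] PySem.Set.empty start fuel
  (r.1, r.2.foldl (fun m x => m.insert x r.1) memo)

def solution_alt (edges : List (List Int)) : List Int :=
  match altBuild edges PySem.Dict.empty PySem.Dict.empty with
  | none => []   -- Python raises ValueError here; excluded by Pre_solution
  | some (g, ind) =>
    let node := ((ind.items.find? (fun kv =>
        kv.2 == 0 && decide (2 ≤ (g.getD kv.1 []).length))).map (·.1)).getD (-1)
    let res := (g.getD node []).foldl (fun (acc : (Int × Int × Int) × PySem.Dict Int Int) s =>
        let r := classifyB g s acc.2 (edges.length + 1)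
        (if r.1 == 1 then (acc.1.1 + 1, acc.1.2.1, acc.1.2.2)
         else if r.1 == 2 then (acc.1.1, acc.1.2.1 + 1, acc.1.2.2)
         else (acc.1.1, acc.1.2.1, acc.1.2.2 + 1), r.2)) ((0, 0, 0), PySem.Dict.empty)
    [node, res.1.1, res.1.2.1, res.1.2.2]

-- ===== PRECONDITION & SPEC =====
-- closed-form helpers for Pre_: degrees, the generator node, its successors, and the
-- first-successor step function of the graph (no port code is re-run here)
def pvPairs (edges : List (List Int)) : List (Int × Int) :=
  edges.filterMap (fun e => match e with | [a, b] => some (a, b) | _ => none)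
def pvOut (edges : List (List Int)) (k : Int) : Nat := ((pvPairs edges).map (·.1)).count k
def pvIn (edges : List (List Int)) (k : Int) : Nat := ((pvPairs edges).map (·.2)).count k
def pvNode (edges : List (List Int)) : Int :=
  ((PySem.List.dedup ((pvPairs edges).flatMap (fun p => [p.2, p.1]))).find?
      (fun k => pvIn edges k == 0 && decide (2 ≤ pvOut edges k))).getD (-1)
def pvSuccs (edges : List (List Int)) : List Int :=
  ((pvPairs edges).filter (fun p => p.1 == pvNode edges)).map (·.2)
-- the first out-neighbour of x (x itself if it has none)
def pvF (edges : List (List Int)) (x : Int) : Int :=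
  (((pvPairs edges).find? (fun p => p.1 == x)).map (·.2)).getD x
def pvY (edges : List (List Int)) (s : Int) (k : Nat) : Int := (pvF edges)^[k] s
-- a walk event at step k of the orbit of s: an out-degree-0 or -2 node, or a return to s
def pvEvB (edges : List (List Int)) (s : Int) (k : Nat) : Bool :=
  pvOut edges (pvY edges s k) == 0 || pvOut edges (pvY edges s k) == 2 ||
    (decide (1 ≤ k) && pvY edges s k == s)
-- the orbit of s meets a walk event within |edges| steps (iff A's walk from s terminates)
def TermB (edges : List (List Int)) (s : Int) : Prop :=
  ((List.range (edges.length + 1)).any (pvEvB edges s)) = true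

-- Pre_ excludes edges that are not two-element lists (Python A raises ValueError unpacking
-- them) and graphs on which A's while-loop never terminates (the first-successor orbit of
-- some successor of the generator node meets no out-degree-0/2 node and never returns to its
-- start); on every input where A returns a value, Pre_ holds.
def Pre_solution (edges : List (List Int)) : Prop :=
  (∀ e ∈ edges, e.length = 2) ∧ ∀ s ∈ pvSuccs edges, TermB edges s
instance (edges : List (List Int)) : Decidable (Pre_solution edges) := by
  unfold Pre_solution TermB; infer_instance

def pvWitness_solution : List (List Int) := [[1, 2], [1, 3]]

def Spec_solution (edges : List (List Int)) (out : List Int) : Prop := out = solution_alt edges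
instance (edges : List (List Int)) (out : List Int) : Decidable (Spec_solution edges out) := by
  unfold Spec_solution; infer_instance

-- ===== CLAIM (what is proved, stated in full; the proofs are below) =====
def Claim_equal_solution : Prop :=
  ∀ (edges : List (List Int)), Dom_solution edges → Pre_solution edges →
    Spec_solution edges (solution edges)

-- ===== LEMMAS AND PROOFS =====

-- proof-side abbreviations
def pvK (edges : List (List Int)) (s : Int) : Nat :=
  (((List.range (edges.length + 1)).find? (pvEvB edges s))).getD 0
def specC (edges : List (List Int)) (s : Int) : Int :=
  if 1 ≤ pvK edges s ∧ pvY edges s (pvK edges s) = s then 1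
  else if pvOut edges (pvY edges s (pvK edges s)) = 0 then 2 else 3
def classOut : Int → Int × Int × Int :=
  fun c => if c = 1 then (1, 0, 0) else if c = 2 then (0, 1, 0) else (0, 0, 1)
def chainL (edges : List (List Int)) (s : Int) (m : Nat) : List Int :=
  (List.range m).map (pvY edges s)
def memoValid (edges : List (List Int)) (memo : PySem.Dict Int Int) : Prop :=
  ∀ x c, memo.get? x = some c → TermB edges x ∧ specC edges x = c

-- the build loop of A, on well-formed edges, is the two folds over the unpacked pairs
theorem solBuild_eq (edges : List (List Int)) (ind : PySem.Dict Int Int)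
    (g : PySem.Dict Int (List Int)) (h : ∀ e ∈ edges, e.length = 2) :
    solBuild edges ind g = some
      ((pvPairs edges).foldl (fun d p => (d.modify p.2 0 (· + 1)).modify p.1 0 (· + 0)) ind,
       (pvPairs edges).foldl (fun d p => d.modify p.1 [] (· ++ [p.2])) g) := by
  induction edges generalizing ind g with
  | nil => simp [solBuild, pvPairs]
  | cons e rest ih =>
    obtain ⟨a, b, rfl⟩ := List.length_eq_two.mp (h e (List.mem_cons_self ..))
    have hrest : ∀ e ∈ rest, e.length = 2 := fun e he => h e (List.mem_cons_of_mem _ he)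
    simp [solBuild, pvPairs, ih _ _ hrest]

theorem keys_insert_add {ν : Type} (d : PySem.Dict Int ν) (k : Int) (v : ν) :
    (d.insert k v).keys = PySem.Set.add d.keys k := by
  by_cases h : d.contains k
  · rw [PySem.Dict.keys_insert_of_contains d v h]
    simp [PySem.Set.add, PySem.Set.contains, (PySem.Dict.contains_iff_mem_keys d k).mp h]
  · rw [PySem.Dict.keys_insert_of_not_contains d v (by simpa using h)]
    have hm : k ∉ d.keys := fun hm => h ((PySem.Dict.contains_iff_mem_keys d k).mpr hm)
    simp [PySem.Set.add, PySem.Set.contains, hm]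

theorem foldInd_getD (l : List (Int × Int)) (d : PySem.Dict Int Int) (k : Int) :
    (l.foldl (fun d p => (d.modify p.2 0 (· + 1)).modify p.1 0 (· + 0)) d).getD k 0
      = d.getD k 0 + ((l.map (·.2)).count k : Int) := by
  induction l generalizing d with
  | nil => simp
  | cons p l ih =>
    rw [List.foldl_cons, ih]
    simp only [PySem.Dict.getD_modify, List.map_cons, List.count_cons]
    split_ifs <;> simp_all <;> ring

theorem foldInd_keys (l : List (Int × Int)) (d : PySem.Dict Int Int) :
    (l.foldl (fun d p => (d.modify p.2 0 (· + 1)).modify p.1 0 (· + 0)) d).keys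
      = PySem.Set.update d.keys (l.flatMap (fun p => [p.2, p.1])) := by
  induction l generalizing d with
  | nil => simp [PySem.Set.update]
  | cons p l ih =>
    rw [List.foldl_cons, ih]
    simp only [PySem.Set.update, List.flatMap_cons, List.foldl_append, List.foldl_cons,
      List.foldl_nil, PySem.Dict.keys_modify, keys_insert_add]

-- count of a source in the pairs = length of its adjacency list
theorem filter_len_count (l : List (Int × Int)) (k : Int) :
    ((l.filter (fun p => p.1 == k)).map (·.2)).length = (l.map (·.1)).count k := by
  simp only [List.length_map, List.count, List.countP_map, ← List.countP_eq_length_filter]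
  exact List.countP_congr (fun a _ => by simp [Function.comp])

theorem find?_congr' {α : Type} (p q : α → Bool) (l : List α) (h : ∀ a ∈ l, p a = q a) :
    l.find? p = l.find? q := by
  induction l with
  | nil => rfl
  | cons x l ih =>
    simp only [List.find?_cons, h x (List.mem_cons_self ..)]
    split <;> simp [ih fun a ha => h a (List.mem_cons_of_mem _ ha)]

-- A's two dicts after the build loop (proof-side names)
def indA (edges : List (List Int)) : PySem.Dict Int Int :=
  (pvPairs edges).foldl (fun d p => (d.modify p.2 0 (· + 1)).modify p.1 0 (· + 0)) PySem.Dict.empty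
def gA (edges : List (List Int)) : PySem.Dict Int (List Int) :=
  (pvPairs edges).foldl (fun d p => d.modify p.1 [] (· ++ [p.2])) PySem.Dict.empty

theorem solBuild_empty (edges : List (List Int)) (h2 : ∀ e ∈ edges, e.length = 2) :
    solBuild edges PySem.Dict.empty PySem.Dict.empty = some (indA edges, gA edges) := by
  rw [solBuild_eq edges _ _ h2]; rfl

theorem gA_getD (edges : List (List Int)) (k : Int) :
    (gA edges).getD k [] = ((pvPairs edges).filter (fun p => p.1 == k)).map (·.2) := by
  simp [gA, PySem.Dict.getD_foldl_modify_append]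

theorem gA_len (edges : List (List Int)) (k : Int) :
    ((gA edges).getD k []).length = pvOut edges k := by
  rw [gA_getD]; exact filter_len_count _ _

theorem indA_getD (edges : List (List Int)) (k : Int) :
    (indA edges).getD k 0 = (pvIn edges k : Int) := by
  unfold indA
  rw [foldInd_getD]
  simp [pvIn]

theorem indA_keys (edges : List (List Int)) :
    (indA edges).keys = PySem.Set.ofList ((pvPairs edges).flatMap (fun p => [p.2, p.1])) := by
  rw [indA, foldInd_keys]
  simp [PySem.Set.update, PySem.Set.ofList, PySem.Dict.keys_empty]

theorem indA_nodup (edges : List (List Int)) : (indA edges).keys.Nodup := by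
  rw [indA_keys]; exact PySem.Set.nodup_ofList _

theorem castBeq0 (c : Nat) : ((c : Int) == 0) = (c == 0) := by
  rw [Bool.eq_iff_iff]
  simp only [beq_iff_eq]
  omega

theorem nodeA_eq (edges : List (List Int)) :
    ((((indA edges).items.find? (fun kv =>
        kv.2 == 0 && decide (2 ≤ ((gA edges).getD kv.1 []).length))).map (·.1)).getD (-1))
      = pvNode edges := by
  rw [PySem.Dict.items_eq_map_keys _ (indA_nodup edges) 0, List.find?_map, indA_keys]
  unfold pvNode
  rw [PySem.List.dedup_eq_ofList, Option.map_map]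
  rw [find?_congr' _ (fun k => pvIn edges k == 0 && decide (2 ≤ pvOut edges k)) _
    (fun k _ => by
      simp only [Function.comp_apply]
      rw [indA_getD, gA_len, castBeq0])]
  cases ((PySem.Set.ofList ((pvPairs edges).flatMap fun p => [p.2, p.1])).find?
    (fun k => pvIn edges k == 0 && decide (2 ≤ pvOut edges k))) <;> rfl


-- ----- B's build loop equals A's dicts -----
theorem modify_eq_insert {ν : Type} (d : PySem.Dict Int ν) (k : Int) (d0 : ν) (f : ν → ν) :
    d.modify k d0 f = d.insert k (f (d.getD k d0)) := rfl

theorem insert_getD_self {ν : Type} (d : PySem.Dict Int ν) (a : Int) (d0 : ν)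
    (hc : d.contains a = true) (hnd : d.keys.Nodup) : d.insert a (d.getD a d0) = d := by
  apply PySem.Dict.ext
  rw [PySem.Dict.items_insert_of_contains _ _ hc]
  have : d.items.map (fun p => if p.1 == a then (a, d.getD a d0) else p) = d.items.map id := by
    apply List.map_congr_left
    intro p hp
    by_cases hpa : p.1 == a
    · have hpa' : p.1 = a := by simpa using hpa
      subst hpa'
      have hv : d.getD p.1 d0 = p.2 :=
        PySem.Dict.getD_of_mem_items d (by simpa using hp) hnd d0
      simp [hv]
    · simp [hpa]
  simpa using this

theorem altStep (d : PySem.Dict Int Int) (a b : Int) (hnd : d.keys.Nodup) :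
    (d.insert b (d.getD b 0 + 1)).setdefault a 0
      = (d.modify b 0 (· + 1)).modify a 0 (· + 0) := by
  rw [modify_eq_insert, modify_eq_insert]
  set d' := d.insert b (d.getD b 0 + 1) with hd'
  have hnd' : d'.keys.Nodup := PySem.Dict.nodup_keys_insert _ _ _ hnd
  by_cases hc : d'.contains a
  · rw [PySem.Dict.setdefault_of_contains _ _ hc]
    have := insert_getD_self d' a 0 hc hnd'
    rw [show d'.getD a 0 + 0 = d'.getD a 0 from by ring, this]
  · rw [PySem.Dict.setdefault_of_not_contains _ _ (by simpa using hc)]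
    rw [PySem.Dict.getD_of_not_contains _ _ (by simpa using hc)]
    norm_num

theorem foldl_altstep_eq (l : List (Int × Int)) (d : PySem.Dict Int Int) (hnd : d.keys.Nodup) :
    l.foldl (fun d p => (d.insert p.2 (d.getD p.2 0 + 1)).setdefault p.1 0) d
      = l.foldl (fun d p => (d.modify p.2 0 (· + 1)).modify p.1 0 (· + 0)) d := by
  induction l generalizing d with
  | nil => rfl
  | cons p l ih =>
    rw [List.foldl_cons, List.foldl_cons, altStep d p.1 p.2 hnd]
    exact ih _ (by
      rw [modify_eq_insert, modify_eq_insert]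
      exact PySem.Dict.nodup_keys_insert _ _ _ (PySem.Dict.nodup_keys_insert _ _ _ hnd))

theorem altBuild_eq (edges : List (List Int)) (g : PySem.Dict Int (List Int))
    (ind : PySem.Dict Int Int) (h : ∀ e ∈ edges, e.length = 2) :
    altBuild edges g ind = some
      ((pvPairs edges).foldl (fun d p => d.modify p.1 [] (· ++ [p.2])) g,
       (pvPairs edges).foldl (fun d p => (d.insert p.2 (d.getD p.2 0 + 1)).setdefault p.1 0) ind) := by
  induction edges generalizing g ind with
  | nil => simp [altBuild, pvPairs]
  | cons e rest ih =>
    obtain ⟨a, b, rfl⟩ := List.length_eq_two.mp (h e (List.mem_cons_self ..))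
    have hrest : ∀ e ∈ rest, e.length = 2 := fun e he => h e (List.mem_cons_of_mem _ he)
    simp [altBuild, pvPairs, ih _ _ hrest]

theorem altBuild_empty (edges : List (List Int)) (h2 : ∀ e ∈ edges, e.length = 2) :
    altBuild edges PySem.Dict.empty PySem.Dict.empty = some (gA edges, indA edges) := by
  rw [altBuild_eq edges _ _ h2, foldl_altstep_eq _ _ PySem.Dict.nodup_keys_empty]
  rfl


-- ----- the orbit / walk-event theory -----
-- event as a Prop
def evP (edges : List (List Int)) (s : Int) (k : Nat) : Prop :=
  pvOut edges (pvY edges s k) = 0 ∨ pvOut edges (pvY edges s k) = 2 ∨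
    (1 ≤ k ∧ pvY edges s k = s)

theorem evB_iff (edges : List (List Int)) (s : Int) (k : Nat) :
    pvEvB edges s k = true ↔ evP edges s k := by
  simp only [pvEvB, evP, Bool.or_eq_true, beq_iff_eq, decide_eq_true_eq, Bool.and_eq_true]
  tauto

theorem pvY_zero (edges : List (List Int)) (s : Int) : pvY edges s 0 = s := rfl
theorem pvY_succ (edges : List (List Int)) (s : Int) (k : Nat) :
    pvY edges s (k + 1) = pvF edges (pvY edges s k) := Function.iterate_succ_apply' _ _ _
theorem pvY_add (edges : List (List Int)) (s : Int) (m j : Nat) :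
    pvY edges (pvY edges s m) j = pvY edges s (m + j) := by
  simp [pvY, ← Function.iterate_add_apply, Nat.add_comm]

-- find? over an initial range returns the least index satisfying p
theorem find?_range_spec (n : Nat) (p : Nat → Bool) (h : (List.range n).any p = true) :
    ∃ k, (List.range n).find? p = some k ∧ p k = true ∧ k < n ∧ ∀ j < k, p j = false := by
  induction n with
  | zero => simp at h
  | succ n ih =>
    by_cases hn : (List.range n).any p = true
    · obtain ⟨k, hf, hp, hk, hmin⟩ := ih hn
      refine ⟨k, ?_, hp, by omega, hmin⟩
      rw [List.range_succ, List.find?_append, hf]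
      rfl
    · have hall : ∀ j < n, p j = false := by
        intro j hj
        by_contra hc
        exact hn (List.any_eq_true.mpr ⟨j, List.mem_range.mpr hj, by simpa using hc⟩)
      have hpn : p n = true := by
        rw [List.range_succ, List.any_append] at h
        simp only [Bool.or_eq_true] at h
        rcases h with h | h
        · exact absurd h hn
        · simpa using h
      refine ⟨n, ?_, hpn, by omega, hall⟩
      rw [List.range_succ, List.find?_append]
      have : (List.range n).find? p = none := by
        rw [List.find?_eq_none]
        intro j hj
        simp [hall j (List.mem_range.mp hj)]
      rw [this]
      simp [hpn]

-- under TermB, pvK is the least event index, and it is ≤ |edges|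
theorem pvK_spec (edges : List (List Int)) (s : Int) (h : TermB edges s) :
    evP edges s (pvK edges s) ∧ (∀ j < pvK edges s, ¬ evP edges s j) ∧
      pvK edges s ≤ edges.length := by
  obtain ⟨k, hf, hp, hk, hmin⟩ := find?_range_spec _ _ h
  have : pvK edges s = k := by simp [pvK, hf]
  rw [this]
  exact ⟨(evB_iff _ _ _).mp hp, fun j hj hev =>
    by simpa [(evB_iff _ _ _).mpr hev] using hmin j hj, by omega⟩

-- a TermB certificate from an explicit least event index
theorem pvK_char (edges : List (List Int)) (t : Int) (k : Nat) (hk : k ≤ edges.length)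
    (hev : evP edges t k) (hmin : ∀ j < k, ¬ evP edges t j) :
    TermB edges t ∧ pvK edges t = k := by
  have hterm : TermB edges t := List.any_eq_true.mpr
    ⟨k, List.mem_range.mpr (by omega), (evB_iff _ _ _).mpr hev⟩
  obtain ⟨hev', hmin', _⟩ := pvK_spec edges t hterm
  have : pvK edges t = k := by
    by_contra hne
    rcases Nat.lt_or_ge (pvK edges t) k with hlt | hge
    · exact hmin _ hlt hev'
    · exact hmin' _ (by omega) hev
  exact ⟨hterm, this⟩

-- once the orbit repeats, it is periodic
theorem iter_period (edges : List (List Int)) (s : Int) {i j : Nat} (hij : i < j)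
    (heq : pvY edges s i = pvY edges s j) :
    ∀ n, i ≤ n → pvY edges s n = pvY edges s (i + (n - i) % (j - i)) := by
  intro n
  induction n using Nat.strong_induction_on with
  | _ n ihn =>
    intro hin
    by_cases hnj : n < j
    · rw [Nat.mod_eq_of_lt (by omega)]
      congr 1
      omega
    · have hjn : j ≤ n := by omega
      have hstep : pvY edges s n = pvY edges s (n - (j - i)) := by
        have h1 : pvY edges s n = pvY edges (pvY edges s j) (n - j) := by
          rw [pvY_add]
          congr 1
          omega
        have h2 : pvY edges s (n - (j - i)) = pvY edges (pvY edges s i) (n - j) := by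
          rw [pvY_add]
          congr 1
          omega
        rw [h1, h2, heq]
      rw [hstep, ihn (n - (j - i)) (by omega) (by omega)]
      congr 1
      have : n - i = (n - (j - i) - i) + (j - i) := by omega
      rw [this, Nat.add_mod_right]

-- before the first event the orbit is injective, except that a donut closes at (0, K)
theorem D1 (edges : List (List Int)) (s : Int) (h : TermB edges s) {i j : Nat}
    (hij : i < j) (hjK : j ≤ pvK edges s) (heq : pvY edges s i = pvY edges s j) :
    i = 0 ∧ j = pvK edges s ∧ pvY edges s (pvK edges s) = s := by
  obtain ⟨hev, hmin, _⟩ := pvK_spec edges s h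
  set K := pvK edges s with hK
  have hiK : i ≤ K := by omega
  have hyK : pvY edges s K = pvY edges s (i + (K - i) % (j - i)) :=
    iter_period edges s hij heq K hiK
  set r := i + (K - i) % (j - i) with hr
  have hrj : r < j := by
    have := Nat.mod_lt (K - i) (y := j - i) (by omega)
    omega
  have hrK : r < K := by omega
  -- the event at K cannot be a degree event: it would repeat at r < K
  have hret : 1 ≤ K ∧ pvY edges s K = s := by
    rcases hev with h0 | h2 | hrt
    · exact absurd (Or.inl (by rw [← hyK]; exact h0)) (hmin r hrK)
    · exact absurd (Or.inr (Or.inl (by rw [← hyK]; exact h2))) (hmin r hrK)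
    · exact hrt
  -- so y r = s; r ≥ 1 would be an earlier return event
  have hr0 : r = 0 := by
    by_contra hne
    exact hmin r hrK (Or.inr (Or.inr ⟨by omega, by rw [← hyK]; exact hret.2⟩))
  have hi0 : i = 0 := by omega
  have hjK' : j = K := by
    by_contra hne
    have hjK2 : j < K := by omega
    have : pvY edges s j = s := by rw [← heq, hi0, pvY_zero]
    exact hmin j hjK2 (Or.inr (Or.inr ⟨by omega, this⟩))
  exact ⟨hi0, hjK', hret.2⟩


-- M: every node the walk from s visits before its first event terminates and has the same class
theorem specC_shift (edges : List (List Int)) (s : Int) (h : TermB edges s) {m : Nat}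
    (hm : m ≤ pvK edges s) :
    TermB edges (pvY edges s m) ∧ specC edges (pvY edges s m) = specC edges s := by
  obtain ⟨hev, hmin, hKle⟩ := pvK_spec edges s h
  set K := pvK edges s with hK
  set t := pvY edges s m with ht
  have hYt : ∀ j, pvY edges t j = pvY edges s (m + j) := fun j => pvY_add edges s m j
  by_cases hs : 1 ≤ K ∧ pvY edges s K = s
  · -- donut case: the orbit is a pure cycle of length K through s
    rcases Nat.eq_or_lt_of_le hm with hmK | hmK
    · -- m = K: t = s, trivial
      have : t = s := by rw [ht, hmK, hs.2]
      rw [this]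
      exact ⟨h, rfl⟩
    · have hper : ∀ n, pvY edges s n = pvY edges s (n % K) := by
        intro n
        have := iter_period edges s (i := 0) (j := K) (by omega)
          (by rw [pvY_zero, hs.2]) n (by omega)
        simpa using this
      have hnodeg : ∀ r < K, pvOut edges (pvY edges s r) ≠ 0 ∧ pvOut edges (pvY edges s r) ≠ 2 := by
        intro r hr
        have := hmin r hr
        simp only [evP, not_or] at this
        exact ⟨this.1, this.2.1⟩
      have hevt : evP edges t K := by
        refine Or.inr (Or.inr ⟨hs.1, ?_⟩)
        rw [hYt K, hper (m + K), Nat.add_mod_right, Nat.mod_eq_of_lt hmK, ht]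
      have hmint : ∀ j < K, ¬ evP edges t j := by
        intro j hj hevj
        rcases hevj with h0 | h2 | hrt
        · rw [hYt j, hper (m + j)] at h0
          exact (hnodeg _ (Nat.mod_lt _ (by omega))).1 h0
        · rw [hYt j, hper (m + j)] at h2
          exact (hnodeg _ (Nat.mod_lt _ (by omega))).2 h2
        · -- a return to t before K steps would close the cycle early
          have hret : pvY edges s ((m + j) % K) = pvY edges s m := by
            rw [← hper (m + j), ← hYt j, hrt.2, ht]
          by_cases hmj : m + j < K
          · rw [Nat.mod_eq_of_lt hmj] at hret
            rcases D1 edges s h (i := m) (j := m + j) (by omega) (by omega) hret.symm with ⟨_, hjj, _⟩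
            omega
          · have hlt : m + j - K < K := by omega
            have : (m + j) % K = m + j - K := by
              conv_lhs => rw [Nat.mod_eq_sub_mod (by omega : K ≤ m + j)]
              exact Nat.mod_eq_of_lt hlt
            rw [this] at hret
            rcases Nat.lt_trichotomy (m + j - K) m with hc | hc | hc
            · rcases D1 edges s h (i := m + j - K) (j := m) hc (by omega) hret with ⟨_, hjj, _⟩
              omega
            · omega
            · rcases D1 edges s h (i := m) (j := m + j - K) hc (by omega) hret.symm with ⟨_, hjj, _⟩
              omega
      obtain ⟨hterm, hKt⟩ := pvK_char edges t K hKle hevt hmint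
      refine ⟨hterm, ?_⟩
      have h1 : specC edges t = 1 := by
        unfold specC
        rw [hKt]
        have : pvY edges t K = t := by
          rw [hYt K, hper (m + K), Nat.add_mod_right, Nat.mod_eq_of_lt hmK, ht]
        simp [hs.1, this]
      have h2 : specC edges s = 1 := by
        unfold specC
        rw [← hK]
        simp [hs.1, hs.2]
      rw [h1, h2]
  · -- degree case: the walk ends at an out-degree-0/2 node at step K
    have hdeg : pvOut edges (pvY edges s K) = 0 ∨ pvOut edges (pvY edges s K) = 2 := by
      rcases hev with h0 | h2 | hrt
      · exact Or.inl h0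
      · exact Or.inr h2
      · exact absurd hrt hs
    have hevt : evP edges t (K - m) := by
      rcases hdeg with h0 | h2
      · exact Or.inl (by rw [hYt, show m + (K - m) = K by omega]; exact h0)
      · exact Or.inr (Or.inl (by rw [hYt, show m + (K - m) = K by omega]; exact h2))
    have hmint : ∀ j < K - m, ¬ evP edges t j := by
      intro j hj hevj
      rcases hevj with h0 | h2 | hrt
      · rw [hYt j] at h0
        exact hmin (m + j) (by omega) (Or.inl h0)
      · rw [hYt j] at h2
        exact hmin (m + j) (by omega) (Or.inr (Or.inl h2))
      · have : pvY edges s (m + j) = pvY edges s m := by rw [← hYt j, hrt.2, ht]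
        rcases D1 edges s h (i := m) (j := m + j) (by omega) (by omega) this.symm with ⟨_, hjj, _⟩
        omega
    obtain ⟨hterm, hKt⟩ := pvK_char edges t (K - m) (by omega) hevt hmint
    refine ⟨hterm, ?_⟩
    have hbr : ¬ (1 ≤ pvK edges t ∧ pvY edges t (pvK edges t) = t) := by
      rw [hKt]
      rintro ⟨hge, hret⟩
      rw [hYt, show m + (K - m) = K by omega, ht] at hret
      rcases D1 edges s h (i := m) (j := K) (by omega) (by omega) hret.symm with ⟨_, _, hKs⟩
      exact hs ⟨by omega, hKs⟩
    rw [hKt] at hbr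
    unfold specC
    rw [hKt, ← hK]
    rw [if_neg hbr, if_neg hs, hYt, show m + (K - m) = K by omega]


-- ----- A's walk computes classOut (specC s) -----
theorem filter_head? {α : Type} (p : α → Bool) (l : List α) :
    (l.filter p).head? = l.find? p := by
  induction l with
  | nil => rfl
  | cons x l ih =>
    by_cases hx : p x
    · simp [hx]
    · simp [hx, ih]

theorem head_gA (edges : List (List Int)) (x : Int) (h : pvOut edges x ≠ 0) :
    ((gA edges).getD x []).headD 0 = pvF edges x := by
  rw [gA_getD]
  have hlen : ((pvPairs edges).filter (fun p => p.1 == x)).length ≠ 0 := by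
    intro hc
    apply h
    unfold pvOut
    rw [← filter_len_count, List.length_map, hc]
  cases hf : (pvPairs edges).filter (fun p => p.1 == x) with
  | nil => rw [hf] at hlen; simp at hlen
  | cons q t =>
    have : (pvPairs edges).find? (fun p => p.1 == x) = some q := by
      rw [← filter_head?, hf]; rfl
    simp [pvF, this]

theorem walkA_eval (edges : List (List Int)) (s : Int) (h : TermB edges s) :
    ∀ fuel m, m ≤ pvK edges s → (m = 0 ∨ pvY edges s m ≠ s) → pvK edges s - m < fuel →
      solWalk (gA edges) s (pvY edges s m) fuel = classOut (specC edges s) := by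
  obtain ⟨hev, hmin, hKle⟩ := pvK_spec edges s h
  intro fuel
  induction fuel with
  | zero => omega
  | succ n ih =>
    intro m hm hys hfuel
    rcases Nat.eq_or_lt_of_le hm with hmK | hmK
    · -- m = K: the event here must be a degree event
      have hdeg : pvOut edges (pvY edges s m) = 0 ∨ pvOut edges (pvY edges s m) = 2 := by
        rcases hev with h0 | h2 | hrt
        · exact Or.inl (by rw [hmK]; exact h0)
        · exact Or.inr (by rw [hmK]; exact h2)
        · exfalso
          rcases hys with h0' | hne
          · omega
          · rw [hmK] at hne; exact hne hrt.2
      have hbr : ¬ (1 ≤ pvK edges s ∧ pvY edges s (pvK edges s) = s) := by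
        rintro ⟨hge, hret⟩
        rcases hys with h0' | hne
        · omega
        · rw [hmK] at hne; exact hne hret
      rcases hdeg with h0 | h2
      · have hspec : specC edges s = 2 := by
          unfold specC
          rw [if_neg hbr, if_pos (by rw [← hmK]; exact h0)]
        rw [solWalk, hspec]
        simp [gA_len, h0, classOut]
      · have hspec : specC edges s = 3 := by
          unfold specC
          have hK2 : pvOut edges (pvY edges s (pvK edges s)) = 2 := by rw [← hmK]; exact h2
          rw [if_neg hbr, if_neg (by omega)]
        rw [solWalk, hspec]
        simp [gA_len, h2, classOut]
    · -- m < K: no event here, step on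
      have hnev := hmin m hmK
      simp only [evP, not_or] at hnev
      obtain ⟨hne0, hne2, _⟩ := hnev
      have hstep : ((gA edges).getD (pvY edges s m) []).headD 0 = pvY edges s (m + 1) := by
        rw [head_gA edges _ hne0, pvY_succ]
      rw [solWalk]
      simp only [gA_len, hstep]
      rw [if_neg (by simp [hne0]), if_neg (by simp [hne2])]
      by_cases hret : pvY edges s (m + 1) = s
      · -- this step returns to the start: K = m+1 and the class is donut
        have hevm1 : evP edges s (m + 1) := Or.inr (Or.inr ⟨by omega, hret⟩)
        have hKm1 : pvK edges s = m + 1 := by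
          by_contra hne
          rcases Nat.lt_or_ge (m + 1) (pvK edges s) with hlt | hge
          · exact hmin _ hlt hevm1
          · omega
        have hspec : specC edges s = 1 := by
          unfold specC
          rw [if_pos ⟨by omega, by rw [hKm1]; exact hret⟩]
        rw [if_pos (by simpa using hret), hspec]
        simp [classOut]
      · rw [if_neg (by simpa using hret)]
        exact ih (m + 1) (by omega) (Or.inr hret) (by omega)


-- ----- B's memoized walk computes specC s and labels only same-class nodes -----
theorem chainL_succ (edges : List (List Int)) (s : Int) (m : Nat) :
    chainL edges s (m + 1) = chainL edges s m ++ [pvY edges s m] := by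
  simp [chainL, List.range_succ]

theorem mem_chainL (edges : List (List Int)) (s : Int) (m : Nat) (x : Int) :
    x ∈ chainL edges s m ↔ ∃ i < m, pvY edges s i = x := by
  simp [chainL]

theorem classifyGo_eval (edges : List (List Int)) (s : Int) (h : TermB edges s)
    (memo : PySem.Dict Int Int) (hv : memoValid edges memo) :
    ∀ fuel m (onP : PySem.Set Int), m ≤ pvK edges s → (m = 0 ∨ pvY edges s m ≠ s) →
      (∀ x, onP.contains x = true ↔ x ∈ chainL edges s m) → pvK edges s - m < fuel →
      ∃ p, classifyGo (gA edges) s memo (chainL edges s m) onP (pvY edges s m) fuel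
          = (specC edges s, p)
        ∧ ∀ x ∈ p, TermB edges x ∧ specC edges x = specC edges s := by
  obtain ⟨hev, hmin, hKle⟩ := pvK_spec edges s h
  intro fuel
  induction fuel with
  | zero => omega
  | succ n ih =>
    intro m onP hm hys honP hfuel
    have hlabel : ∀ mm, mm ≤ pvK edges s + 1 →
        ∀ x ∈ chainL edges s mm, TermB edges x ∧ specC edges x = specC edges s := by
      intro mm hmm x hx
      obtain ⟨i, hi, rfl⟩ := (mem_chainL _ _ _ _).mp hx
      exact specC_shift edges s h (by omega)
    rw [classifyGo]
    cases hmemo : memo.get? (pvY edges s m) with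
    | some c =>
      have hvc := hv _ _ hmemo
      have := specC_shift edges s h hm
      refine ⟨chainL edges s m, ?_, hlabel m (by omega)⟩
      rw [show c = specC edges s by rw [← hvc.2, this.2]]
    | none =>
      have hnp : onP.contains (pvY edges s m) = false := by
        rw [Bool.eq_false_iff]
        intro hc
        obtain ⟨i, hi, heq⟩ := (mem_chainL _ _ _ _).mp ((honP _).mp hc)
        rcases D1 edges s h hi hm heq with ⟨hi0, hmK, hKs⟩
        rcases hys with h0 | hne
        · omega
        · rw [hmK] at hne; exact hne hKs
      rw [hnp]
      simp only [Bool.false_eq_true, if_false]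
      rcases Nat.eq_or_lt_of_le hm with hmK | hmK
      · -- m = K: degree event (a return event is impossible here)
        have hdeg : pvOut edges (pvY edges s m) = 0 ∨ pvOut edges (pvY edges s m) = 2 := by
          rcases hev with h0 | h2 | hrt
          · exact Or.inl (by rw [hmK]; exact h0)
          · exact Or.inr (by rw [hmK]; exact h2)
          · exfalso
            rcases hys with h0' | hne
            · omega
            · rw [hmK] at hne; exact hne hrt.2
        have hbr : ¬ (1 ≤ pvK edges s ∧ pvY edges s (pvK edges s) = s) := by
          rintro ⟨hge, hret⟩
          rcases hys with h0' | hne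
          · omega
          · rw [hmK] at hne; exact hne hret
        refine ⟨chainL edges s (m + 1), ?_, hlabel (m + 1) (by omega)⟩
        rcases hdeg with h0 | h2
        · have hspec : specC edges s = 2 := by
            unfold specC
            rw [if_neg hbr, if_pos (by rw [← hmK]; exact h0)]
          rw [hspec, chainL_succ]
          simp [gA_len, h0]
        · have hspec : specC edges s = 3 := by
            unfold specC
            have hK2 : pvOut edges (pvY edges s (pvK edges s)) = 2 := by rw [← hmK]; exact h2
            rw [if_neg hbr, if_neg (by omega)]
          rw [hspec, chainL_succ]
          simp [gA_len, h2]
      · -- m < K: no event, step on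
        have hnev := hmin m hmK
        simp only [evP, not_or] at hnev
        obtain ⟨hne0, hne2, _⟩ := hnev
        have hstep : ((gA edges).getD (pvY edges s m) []).headD 0 = pvY edges s (m + 1) := by
          rw [head_gA edges _ hne0, pvY_succ]
        simp only [gA_len, hstep]
        rw [if_neg (by simp [hne0]), if_neg (by simp [hne2])]
        by_cases hret : pvY edges s (m + 1) = s
        · have hevm1 : evP edges s (m + 1) := Or.inr (Or.inr ⟨by omega, hret⟩)
          have hKm1 : pvK edges s = m + 1 := by
            by_contra hne
            rcases Nat.lt_or_ge (m + 1) (pvK edges s) with hlt | hge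
            · exact hmin _ hlt hevm1
            · omega
          have hspec : specC edges s = 1 := by
            unfold specC
            rw [if_pos ⟨by omega, by rw [hKm1]; exact hret⟩]
          refine ⟨chainL edges s (m + 1), ?_, hlabel (m + 1) (by omega)⟩
          rw [if_pos (by simpa using hret), hspec, chainL_succ]
        · rw [if_neg (by simpa using hret)]
          rw [← chainL_succ]
          have honP' : ∀ x, (PySem.Set.add onP (pvY edges s m)).contains x = true ↔
              x ∈ chainL edges s (m + 1) := by
            intro x
            have hmem : x ∈ onP ↔ x ∈ chainL edges s m := by
              rw [← PySem.Set.contains_iff]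
              exact honP x
            rw [PySem.Set.contains_iff, PySem.Set.mem_add, chainL_succ]
            simp only [List.mem_append, List.mem_singleton]
            rw [hmem]
          exact ih (m + 1) _ (by omega) (Or.inr hret) honP' (by omega)


-- labelling a path of same-class nodes keeps the memo valid
theorem memoValid_foldl_insert (edges : List (List Int)) (c : Int) :
    ∀ (p : List Int) (memo : PySem.Dict Int Int), memoValid edges memo →
      (∀ x ∈ p, TermB edges x ∧ specC edges x = c) →
      memoValid edges (p.foldl (fun m x => m.insert x c) memo)
  | [], memo, hv, _ => hv
  | x :: p, memo, hv, hp => by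
    rw [List.foldl_cons]
    refine memoValid_foldl_insert edges c p _ ?_ (fun z hz => hp z (List.mem_cons_of_mem _ hz))
    intro z c' hz
    rw [PySem.Dict.get?_insert] at hz
    split at hz
    · next heq =>
        cases hz
        exact heq ▸ hp x (List.mem_cons_self ..)
    · exact hv _ _ hz

theorem classifyB_eval (edges : List (List Int)) (s : Int) (h : TermB edges s)
    (memo : PySem.Dict Int Int) (hv : memoValid edges memo) :
    ∃ m', classifyB (gA edges) s memo (edges.length + 1) = (specC edges s, m')
      ∧ memoValid edges m' := by
  obtain ⟨_, _, hKle⟩ := pvK_spec edges s h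
  obtain ⟨p, hgo, hp⟩ := classifyGo_eval edges s h memo hv (edges.length + 1) 0
    PySem.Set.empty (by omega) (Or.inl rfl)
    (by
      intro x
      simp [PySem.Set.empty, chainL])
    (by omega)
  rw [show chainL edges s 0 = ([] : List Int) from rfl] at hgo
  rw [show pvY edges s 0 = s from rfl] at hgo
  refine ⟨p.foldl (fun m x => m.insert x (specC edges s)) memo, ?_, ?_⟩
  · unfold classifyB
    rw [hgo]
  · exact memoValid_foldl_insert edges _ p memo hv (fun x hx => hp x hx)

-- the folds over the successors agree
theorem fold_succs_eq (edges : List (List Int)) :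
    ∀ (l : List Int), (∀ s ∈ l, TermB edges s) →
      ∀ (acc : Int × Int × Int) (memo : PySem.Dict Int Int), memoValid edges memo →
      (l.foldl (fun (acc : (Int × Int × Int) × PySem.Dict Int Int) s =>
          let r := classifyB (gA edges) s acc.2 (edges.length + 1)
          (if r.1 == 1 then (acc.1.1 + 1, acc.1.2.1, acc.1.2.2)
           else if r.1 == 2 then (acc.1.1, acc.1.2.1 + 1, acc.1.2.2)
           else (acc.1.1, acc.1.2.1, acc.1.2.2 + 1), r.2)) (acc, memo)).1
        = l.foldl (fun acc st =>
            let d := solWalk (gA edges) st st (edges.length + 1)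
            (acc.1 + d.1, acc.2.1 + d.2.1, acc.2.2 + d.2.2)) acc
  | [], _, acc, memo, hv => rfl
  | st :: l, hterm, acc, memo, hv => by
    have hst := hterm st (List.mem_cons_self ..)
    obtain ⟨_, _, hKle⟩ := pvK_spec edges st hst
    obtain ⟨m', hcb, hv'⟩ := classifyB_eval edges st hst memo hv
    have hwalk : solWalk (gA edges) st st (edges.length + 1) = classOut (specC edges st) :=
      walkA_eval edges st hst (edges.length + 1) 0 (by omega) (Or.inl rfl) (by omega)
    rw [List.foldl_cons, List.foldl_cons, hcb, hwalk]
    have hacc : (if specC edges st == 1 then (acc.1 + 1, acc.2.1, acc.2.2)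
        else if specC edges st == 2 then (acc.1, acc.2.1 + 1, acc.2.2)
        else (acc.1, acc.2.1, acc.2.2 + 1))
        = (acc.1 + (classOut (specC edges st)).1, acc.2.1 + (classOut (specC edges st)).2.1,
           acc.2.2 + (classOut (specC edges st)).2.2) := by
      unfold classOut
      by_cases h1 : specC edges st = 1
      · simp [h1]
      · by_cases h2 : specC edges st = 2
        · simp [h2]
        · simp [h1, h2]
    exact hacc ▸ fold_succs_eq edges l
      (fun s hs => hterm s (List.mem_cons_of_mem _ hs)) _ m' hv'

-- ===== VERDICT (by name: the statement is the Claim_ definition above) =====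
theorem solution_spec : Claim_equal_solution := by
  intro edges _ hpre
  obtain ⟨h2, hterm⟩ := hpre
  unfold Spec_solution solution solution_alt
  rw [solBuild_empty edges h2, altBuild_empty edges h2]
  dsimp only
  rw [nodeA_eq edges]
  have hsucc : (gA edges).getD (pvNode edges) [] = pvSuccs edges := by
    rw [gA_getD]; rfl
  rw [hsucc]
  have hempty : memoValid edges PySem.Dict.empty := by
    intro x c hx
    rw [PySem.Dict.get?_empty] at hx
    cases hx
  have := fold_succs_eq edges (pvSuccs edges) hterm (0, 0, 0) PySem.Dict.empty hempty
  rw [this]
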